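-- pv_equiv track=rewrite | github.com/ymylive/translator | renpy_utils.py | restore_tags
-- ===== SOURCE A (Python) =====
-- from typing import List, Tuple, Dict, Optional
--
-- def restore_tags(clean_text: str, tags: List[Tuple[int, str]]) -> str:
--     """
--     Restore tags to translated text.
--
--     Args:
--         clean_text: Translated text without tags
--         tags: List of (position, tag) tuples
--
--     Returns:
--         Text with tags restored
--     """
--     if not tags:
--         return clean_text
--
--     # Sort tags by position (descending) to insert from end
--     sorted_tags = sorted(tags, key=lambda x: x[0], reverse=True)
--
--     result = clean_text
--     for pos, tag in sorted_tags:
--         # Clamp position to valid range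
--         pos = min(pos, len(result))
--         result = result[:pos] + tag + result[pos:]
--
--     return result
-- ===== SOURCE B (Python) =====
-- def restore_tags(clean_text, tags):
--     """
--     Restore tags to translated text.
--
--     Keeps the result as a list of pieces: each tag splits one piece at its
--     (slice-normalized) offset, and the pieces are joined once at the end,
--     instead of re-copying the whole string for every insertion.
--     """
--     pieces = [clean_text]
--     length = len(clean_text)
--     for pos, tag in sorted(tags, key=lambda x: x[0], reverse=True):
--         e = min(pos, length)
--         if e < 0:
--             e = max(length + e, 0)
--         # split the piece containing offset e and put the tag there
--         new_pieces = []
--         it = iter(pieces)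
--         for piece in it:
--             if e <= len(piece):
--                 new_pieces.append(piece[:e])
--                 new_pieces.append(tag)
--                 new_pieces.append(piece[e:])
--                 break
--             new_pieces.append(piece)
--             e -= len(piece)
--         else:
--             new_pieces.append(tag)
--         new_pieces.extend(it)
--         pieces = new_pieces
--         length += len(tag)
--     return ''.join(pieces)
-- ===== Notes on version B (the rewrite author's own statement) =====
-- stated objective: faster
-- what changed: B keeps the result as a list of pieces and each tag splits one piece at its slice-normalized offset, joining everything once at the end, instead of re-copying the entire growing string for every insertion.
import Mathlib
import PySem

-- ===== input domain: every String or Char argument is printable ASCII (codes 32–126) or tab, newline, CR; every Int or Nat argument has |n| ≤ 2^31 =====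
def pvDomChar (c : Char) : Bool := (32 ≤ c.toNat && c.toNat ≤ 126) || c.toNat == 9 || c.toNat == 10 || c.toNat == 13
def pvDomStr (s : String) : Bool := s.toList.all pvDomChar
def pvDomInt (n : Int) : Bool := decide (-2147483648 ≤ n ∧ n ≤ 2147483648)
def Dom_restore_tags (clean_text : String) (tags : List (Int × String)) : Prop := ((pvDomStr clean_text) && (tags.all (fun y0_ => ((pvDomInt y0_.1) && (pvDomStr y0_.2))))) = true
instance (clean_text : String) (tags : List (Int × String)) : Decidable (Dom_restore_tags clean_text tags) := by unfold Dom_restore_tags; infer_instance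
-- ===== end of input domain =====

-- B keeps the result as a list of pieces (each tag splits one piece; one join at the end)
-- instead of re-copying the whole string per insertion: exact same return value, better constant cost.

-- ===== PORT A =====
-- loop body of A: result = result[:pos] + tag + result[pos:] with pos = min(pos, len(result))
def aStep (result : List Char) (pt : Int × String) : List Char :=
  let pos : Int := min pt.1 (result.length : Int)
  PySem.List.slice result none (some pos) ++ pt.2.toList ++ PySem.List.slice result (some pos) none

def restore_tags (clean_text : String) (tags : List (Int × String)) : String :=
  if tags = [] then clean_text
  else
    String.ofList ((PySem.List.sorted tags (fun x => x.1) true).foldl aStep clean_text.toList)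

-- ===== PORT B =====
-- Source B's inner for/else loop over the pieces (break = first branch, else = running off the end)
def splitInsertB (tag : List Char) : List (List Char) → Nat → List (List Char)
  | [], _ => [tag]
  | piece :: rest, e =>
      if e ≤ piece.length then piece.take e :: tag :: piece.drop e :: rest
      else piece :: splitInsertB tag rest (e - piece.length)

-- Source B's outer loop body: normalize the slice offset, split a piece, bump the length
def bStep (st : List (List Char) × Int) (pt : Int × String) : List (List Char) × Int :=
  let e : Int := min pt.1 st.2
  let e' : Int := if e < 0 then max (st.2 + e) 0 else e
  (splitInsertB pt.2.toList st.1 e'.toNat, st.2 + (pt.2.toList.length : Int))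

def restore_tags_alt (clean_text : String) (tags : List (Int × String)) : String :=
  String.ofList (((PySem.List.sorted tags (fun x => x.1) true).foldl bStep
    ([clean_text.toList], (clean_text.toList.length : Int))).1.flatten)

-- ===== PRECONDITION & SPEC =====
def Spec_restore_tags (clean_text : String) (tags : List (Int × String)) (out : String) : Prop := out = restore_tags_alt clean_text tags
instance (clean_text : String) (tags : List (Int × String)) (out : String) : Decidable (Spec_restore_tags clean_text tags out) := by unfold Spec_restore_tags; infer_instance

-- ===== CLAIM (what is proved, stated in full; the proofs are below) =====
def Claim_equal_restore_tags : Prop := ∀ (clean_text : String) (tags : List (Int × String)), Dom_restore_tags clean_text tags → Spec_restore_tags clean_text tags (restore_tags clean_text tags)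

-- ===== LEMMAS AND PROOFS =====

-- splitting a piece at offset e and inserting the tag = inserting into the concatenation
lemma flatten_splitInsertB (tag : List Char) :
    ∀ (ps : List (List Char)) (e : Nat),
      (splitInsertB tag ps e).flatten
        = ps.flatten.take e ++ tag ++ ps.flatten.drop e := by
  intro ps
  induction ps with
  | nil => intro e; simp [splitInsertB]
  | cons piece rest ih =>
      intro e
      by_cases h : e ≤ piece.length
      · simp [splitInsertB, h, List.take_append_of_le_length h,
              List.drop_append_of_le_length h]
      · simp only [splitInsertB, if_neg h, List.flatten_cons, ih,
                   List.take_append, List.drop_append]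
        rw [show piece.take e = piece from List.take_of_length_le (by omega),
            show piece.drop e = [] from List.drop_eq_nil_of_le (by omega)]
        simp

-- A's slice-based insertion, written as take/drop at the clamped index
lemma aStep_eq (s : List Char) (pt : Int × String) :
    aStep s pt
      = s.take (PySem.List.clampIdx s.length (min pt.1 (s.length : Int)))
          ++ pt.2.toList
          ++ s.drop (PySem.List.clampIdx s.length (min pt.1 (s.length : Int))) := by
  simp only [aStep, PySem.List.slice, List.drop_zero, Nat.sub_zero]
  rw [show List.take (s.length - PySem.List.clampIdx s.length (min pt.1 (s.length : Int)))
        (List.drop (PySem.List.clampIdx s.length (min pt.1 (s.length : Int))) s)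
      = List.drop (PySem.List.clampIdx s.length (min pt.1 (s.length : Int))) s
      from List.take_of_length_le (by simp [List.length_drop])]

-- B's normalized offset is exactly the clamped slice index A uses
lemma toNat_norm_eq_clampIdx (n : Nat) (p : Int) :
    (if min p (n : Int) < 0 then max ((n : Int) + min p (n : Int)) 0
     else min p (n : Int)).toNat
      = PySem.List.clampIdx n (min p (n : Int)) := by
  simp only [PySem.List.clampIdx]
  split_ifs <;> omega

-- one step of B, on a state satisfying the invariant, tracks one step of A
lemma bStep_eq (ps : List (List Char)) (pt : Int × String) :
    bStep (ps, (ps.flatten.length : Int)) pt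
      = ((bStep (ps, (ps.flatten.length : Int)) pt).1,
         ((bStep (ps, (ps.flatten.length : Int)) pt).1.flatten.length : Int))
    ∧ (bStep (ps, (ps.flatten.length : Int)) pt).1.flatten = aStep ps.flatten pt := by
  have hc := toNat_norm_eq_clampIdx ps.flatten.length pt.1
  have hle : PySem.List.clampIdx ps.flatten.length (min pt.1 (ps.flatten.length : Int))
      ≤ ps.flatten.length := PySem.List.clampIdx_le _ _
  constructor
  · refine Prod.ext rfl ?_
    simp only [bStep, hc, flatten_splitInsertB]
    simp [List.length_append, List.length_take, List.length_drop]
    omega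
  · simp only [bStep, hc, flatten_splitInsertB, aStep_eq]

-- the whole loop: B's pieces always flatten to A's running string
lemma loop_eq (L : List (Int × String)) :
    ∀ (ps : List (List Char)),
      (L.foldl bStep (ps, (ps.flatten.length : Int))).1.flatten
        = L.foldl aStep ps.flatten := by
  induction L with
  | nil => intro ps; simp
  | cons pt L ih =>
      intro ps
      obtain ⟨hshape, hflat⟩ := bStep_eq ps pt
      simp only [List.foldl_cons]
      rw [hshape, ih, hflat]

-- ===== VERDICT (by name: the statement is the Claim_ definition above) =====
theorem restore_tags_spec : Claim_equal_restore_tags := by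
  intro clean_text tags _
  unfold Spec_restore_tags restore_tags restore_tags_alt
  by_cases h : tags = []
  · subst h
    simp [PySem.List.sorted]
  · rw [if_neg h]
    have := loop_eq (PySem.List.sorted tags (fun x => x.1) true) [clean_text.toList]
    simp only [List.flatten_cons, List.flatten_nil, List.append_nil] at this
    rw [this]
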